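-- pv_equiv track=rewrite | github.com/ch1nhpd/strix | strix/tools/assessment/assessment_orchestration_actions.py | _bug_skills
-- ===== SOURCE A (Python) =====
-- def _bug_skills(bug_classes: list[str], module_name: str = "") -> list[str]:
--     lowered = " ".join([*bug_classes, module_name]).lower()
--     skills: list[str] = []
--     if any(keyword in lowered for keyword in ["authorization", "idor", "tenant", "bola"]):
--         skills.extend(["idor", "broken_function_level_authorization"])
--     if any(keyword in lowered for keyword in ["authentication", "jwt", "session", "login", "mfa"]):
--         skills.append("authentication_jwt")
--     if any(keyword in lowered for keyword in ["business", "workflow", "replay", "race"]):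
--         skills.extend(["business_logic", "race_conditions"])
--     if "sql" in lowered:
--         skills.append("sql_injection")
--     if "xss" in lowered or "html injection" in lowered:
--         skills.append("xss")
--     if "ssrf" in lowered:
--         skills.append("ssrf")
--     if "graphql" in lowered:
--         skills.append("graphql")
--     if "open redirect" in lowered:
--         skills.append("open_redirect")
--     if "path traversal" in lowered or "file access" in lowered:
--         skills.append("path_traversal_lfi_rfi")
--     if "file upload" in lowered:
--         skills.append("insecure_file_uploads")
--     if "xxe" in lowered:
--         skills.append("xxe")
--     if "rce" in lowered or "command injection" in lowered:
--         skills.append("rce")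
--     return skills[:5]
-- ===== SOURCE B (Python) =====
-- _KEYWORDS = (
--     "authorization", "idor", "tenant", "bola",
--     "authentication", "jwt", "session", "login", "mfa",
--     "business", "workflow", "replay", "race",
--     "sql", "xss", "html injection", "ssrf", "graphql",
--     "open redirect", "path traversal", "file access",
--     "file upload", "xxe", "rce", "command injection",
-- )
--
-- _SKILL_GROUPS = [
--     (("authorization", "idor", "tenant", "bola"), ["idor", "broken_function_level_authorization"]),
--     (("authentication", "jwt", "session", "login", "mfa"), ["authentication_jwt"]),
--     (("business", "workflow", "replay", "race"), ["business_logic", "race_conditions"]),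
--     (("sql",), ["sql_injection"]),
--     (("xss", "html injection"), ["xss"]),
--     (("ssrf",), ["ssrf"]),
--     (("graphql",), ["graphql"]),
--     (("open redirect",), ["open_redirect"]),
--     (("path traversal", "file access"), ["path_traversal_lfi_rfi"]),
--     (("file upload",), ["insecure_file_uploads"]),
--     (("xxe",), ["xxe"]),
--     (("rce", "command injection"), ["rce"]),
-- ]
--
-- def _bug_skills(bug_classes: list[str], module_name: str = "") -> list[str]:
--     lowered = " ".join([*bug_classes, module_name]).lower()
--     # One sweep over the text: collect the set of keywords that occur anywhere
--     # (testing at each position only keywords whose first character matches),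
--     # then emit labels from the ordered rule table by set membership.
--     found = set()
--     for i in range(len(lowered)):
--         ch = lowered[i]
--         for kw in _KEYWORDS:
--             if kw[0] == ch and lowered.startswith(kw, i):
--                 found.add(kw)
--     return [label
--             for keys, labels in _SKILL_GROUPS
--             if any(k in found for k in keys)
--             for label in labels][:5]
-- ===== Notes on version B (the rewrite author's own statement) =====
-- stated objective: alternative
-- what changed: B scans the joined lowered text once, collecting the set of all keywords that start at each position (prefiltered by first character), then emits skill labels from an ordered rule table by set membership; A instead runs twelve separate substring-containment checks each appending inline.
import Mathlib
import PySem

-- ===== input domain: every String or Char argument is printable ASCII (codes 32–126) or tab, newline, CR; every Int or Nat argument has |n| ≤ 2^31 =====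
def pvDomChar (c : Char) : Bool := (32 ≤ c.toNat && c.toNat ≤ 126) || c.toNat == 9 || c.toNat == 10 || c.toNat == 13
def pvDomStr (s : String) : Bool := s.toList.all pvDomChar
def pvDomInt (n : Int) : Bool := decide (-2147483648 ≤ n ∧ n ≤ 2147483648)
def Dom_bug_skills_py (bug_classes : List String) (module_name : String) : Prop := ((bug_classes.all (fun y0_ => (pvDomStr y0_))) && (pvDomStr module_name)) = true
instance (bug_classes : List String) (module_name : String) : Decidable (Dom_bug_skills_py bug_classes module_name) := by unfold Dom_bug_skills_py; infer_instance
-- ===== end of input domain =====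

-- B replaces A's twelve inline substring-containment branches by one positional sweep over the
-- text that collects the set of matched keywords, then emits labels from an ordered rule table
-- by set membership (alternative algorithm; same result).

-- ===== PORT A =====
def bug_skills_py (bug_classes : List String) (module_name : String) : List String :=
  let lowered := PySem.Str.lower (PySem.Str.join " " (bug_classes ++ [module_name]))
  let skills : List String := []
  let skills := if (["authorization", "idor", "tenant", "bola"].any (fun k => PySem.Str.isIn k lowered)) then skills ++ ["idor", "broken_function_level_authorization"] else skills
  let skills := if (["authentication", "jwt", "session", "login", "mfa"].any (fun k => PySem.Str.isIn k lowered)) then skills ++ ["authentication_jwt"] else skills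
  let skills := if (["business", "workflow", "replay", "race"].any (fun k => PySem.Str.isIn k lowered)) then skills ++ ["business_logic", "race_conditions"] else skills
  let skills := if PySem.Str.isIn "sql" lowered then skills ++ ["sql_injection"] else skills
  let skills := if (PySem.Str.isIn "xss" lowered || PySem.Str.isIn "html injection" lowered) then skills ++ ["xss"] else skills
  let skills := if PySem.Str.isIn "ssrf" lowered then skills ++ ["ssrf"] else skills
  let skills := if PySem.Str.isIn "graphql" lowered then skills ++ ["graphql"] else skills
  let skills := if PySem.Str.isIn "open redirect" lowered then skills ++ ["open_redirect"] else skills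
  let skills := if (PySem.Str.isIn "path traversal" lowered || PySem.Str.isIn "file access" lowered) then skills ++ ["path_traversal_lfi_rfi"] else skills
  let skills := if PySem.Str.isIn "file upload" lowered then skills ++ ["insecure_file_uploads"] else skills
  let skills := if PySem.Str.isIn "xxe" lowered then skills ++ ["xxe"] else skills
  let skills := if (PySem.Str.isIn "rce" lowered || PySem.Str.isIn "command injection" lowered) then skills ++ ["rce"] else skills
  PySem.List.slice skills none (some 5)

-- ===== PORT B =====
def bugKeywords : List String :=
  ["authorization", "idor", "tenant", "bola",
   "authentication", "jwt", "session", "login", "mfa",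
   "business", "workflow", "replay", "race",
   "sql", "xss", "html injection", "ssrf", "graphql",
   "open redirect", "path traversal", "file access",
   "file upload", "xxe", "rce", "command injection"]

def bugSkillGroups : List (List String × List String) :=
  [ (["authorization", "idor", "tenant", "bola"], ["idor", "broken_function_level_authorization"]),
    (["authentication", "jwt", "session", "login", "mfa"], ["authentication_jwt"]),
    (["business", "workflow", "replay", "race"], ["business_logic", "race_conditions"]),
    (["sql"], ["sql_injection"]),
    (["xss", "html injection"], ["xss"]),
    (["ssrf"], ["ssrf"]),
    (["graphql"], ["graphql"]),
    (["open redirect"], ["open_redirect"]),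
    (["path traversal", "file access"], ["path_traversal_lfi_rfi"]),
    (["file upload"], ["insecure_file_uploads"]),
    (["xxe"], ["xxe"]),
    (["rce", "command injection"], ["rce"]) ]

-- the sweep: for i in range(len(lowered)): ch = lowered[i];
--   for kw in _KEYWORDS: if kw[0] == ch and lowered.startswith(kw, i): found.add(kw)
-- (lowered.startswith(kw, i) is ported exactly as Chars.startswith on (L.drop i);
--  kw[0] / lowered[i] as pyGet? — never none here: keywords are nonempty and i < len)
def bugCond (L : List Char) (i : Nat) (ch : Option Char) (kw : String) : Bool :=
  (PySem.Str.pyGet? kw 0 == ch) && PySem.Chars.startswith (L.drop i) kw.toList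

def bugSweep (L : List Char) : PySem.Set String :=
  (List.range L.length).foldl
    (fun found i =>
      let ch := PySem.List.pyGet? L (i : ℕ)
      bugKeywords.foldl
        (fun f kw => if bugCond L i ch kw then PySem.Set.add f kw else f)
        found)
    PySem.Set.empty

def bug_skills_py_alt (bug_classes : List String) (module_name : String) : List String :=
  let lowered := PySem.Str.lower (PySem.Str.join " " (bug_classes ++ [module_name]))
  let found := bugSweep lowered.toList
  -- [label for keys, labels in _SKILL_GROUPS if any(k in found for k in keys) for label in labels]
  let skills := bugSkillGroups.flatMap
    (fun g => if g.1.any (fun k => PySem.Set.contains found k) then g.2 else [])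
  PySem.List.slice skills none (some 5)

-- ===== PRECONDITION & SPEC =====
def Spec_bug_skills_py (bug_classes : List String) (module_name : String) (out : List String) : Prop := out = bug_skills_py_alt bug_classes module_name
instance (bug_classes : List String) (module_name : String) (out : List String) : Decidable (Spec_bug_skills_py bug_classes module_name out) := by unfold Spec_bug_skills_py; infer_instance

-- ===== CLAIM (what is proved, stated in full; the proofs are below) =====
def Claim_equal_bug_skills_py : Prop := ∀ (bug_classes : List String) (module_name : String), Dom_bug_skills_py bug_classes module_name → Spec_bug_skills_py bug_classes module_name (bug_skills_py bug_classes module_name)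

-- ===== LEMMAS AND PROOFS =====

-- membership after the inner keyword pass at one position
theorem mem_bugSweep_inner (p : String → Bool) (kws : List String)
    (f : PySem.Set String) (k : String) :
    k ∈ kws.foldl (fun f kw => if p kw then PySem.Set.add f kw else f) f
      ↔ k ∈ f ∨ (k ∈ kws ∧ p k = true) := by
  induction kws generalizing f with
  | nil => simp
  | cons x xs ih =>
      simp only [List.foldl_cons, ih]
      by_cases hx : p x = true
      · simp only [hx, if_pos]
        rw [PySem.Set.mem_add]
        constructor
        · rintro ((h | rfl) | h)
          · exact Or.inl h
          · exact Or.inr ⟨List.mem_cons_self .., hx⟩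
          · exact Or.inr ⟨List.mem_cons_of_mem _ h.1, h.2⟩
        · rintro (h | ⟨hm, hs⟩)
          · exact Or.inl (Or.inl h)
          · rcases List.mem_cons.mp hm with rfl | hm
            · exact Or.inl (Or.inr rfl)
            · exact Or.inr ⟨hm, hs⟩
      · simp only [hx, if_neg, Bool.not_eq_true]
        constructor
        · rintro (h | h)
          · exact Or.inl h
          · exact Or.inr ⟨List.mem_cons_of_mem _ h.1, h.2⟩
        · rintro (h | ⟨hm, hs⟩)
          · exact Or.inl h
          · rcases List.mem_cons.mp hm with rfl | hm
            · exact absurd hs hx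
            · exact Or.inr ⟨hm, hs⟩

-- membership after the whole sweep over a list of positions
theorem mem_bugSweep_outer (L : List Char) (is : List Nat) (f : PySem.Set String) (k : String) :
    k ∈ is.foldl
        (fun found i =>
          let ch := PySem.List.pyGet? L (i : ℕ)
          bugKeywords.foldl
            (fun f kw => if bugCond L i ch kw then PySem.Set.add f kw else f)
            found) f
      ↔ k ∈ f ∨ (k ∈ bugKeywords ∧
          ∃ i ∈ is, bugCond L i (PySem.List.pyGet? L (i : ℕ)) k = true) := by
  induction is generalizing f with
  | nil => simp
  | cons j js ih =>
      simp only [List.foldl_cons, ih, mem_bugSweep_inner]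
      constructor
      · rintro ((h | ⟨hm, hs⟩) | ⟨hm, i, hi, hs⟩)
        · exact Or.inl h
        · exact Or.inr ⟨hm, j, List.mem_cons_self .., hs⟩
        · exact Or.inr ⟨hm, i, List.mem_cons_of_mem _ hi, hs⟩
      · rintro (h | ⟨hm, i, hi, hs⟩)
        · exact Or.inl (Or.inl h)
        · rcases List.mem_cons.mp hi with rfl | hi
          · exact Or.inl (Or.inr ⟨hm, hs⟩)
          · exact Or.inr ⟨hm, i, hi, hs⟩

-- for a nonempty keyword of the table, membership in the sweep's set IS substring containment
theorem mem_bugSweep_iff (L : List Char) (k : String)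
    (hne : k.toList ≠ []) (hmem : k ∈ bugKeywords) :
    k ∈ bugSweep L ↔ PySem.Chars.isIn k.toList L = true := by
  unfold bugSweep
  rw [mem_bugSweep_outer]
  constructor
  · rintro (h | ⟨_, i, _, hs⟩)
    · simp [PySem.Set.empty] at h
    · exact (PySem.Chars.exists_prefix_drop_iff_isIn k.toList L).mp
        ⟨i, (PySem.Chars.startswith_iff _ _).mp (Bool.and_elim_right hs)⟩
  · intro hin
    obtain ⟨j, hj⟩ := (PySem.Chars.exists_prefix_drop_iff_isIn k.toList L).mpr hin
    have hjlt : j < L.length := by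
      by_contra h
      rw [List.drop_eq_nil_of_le (Nat.le_of_not_lt h), List.prefix_nil] at hj
      exact hne hj
    refine Or.inr ⟨hmem, j, List.mem_range.mpr hjlt, ?_⟩
    obtain ⟨c, rest, hk⟩ : ∃ c rest, k.toList = c :: rest := by
      cases hck : k.toList with
      | nil => exact absurd hck hne
      | cons c rest => exact ⟨c, rest, rfl⟩
    have hj2 := hj
    obtain ⟨t, ht⟩ := hj
    have hdrop : L.drop j = c :: (rest ++ t) := by rw [← ht, hk]; simp
    have hLj : L[j]? = some c := by
      have h0 : (List.drop j L)[0]? = L[j + 0]? := List.getElem?_drop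
      rw [hdrop] at h0
      simpa using h0.symm
    unfold bugCond
    refine Bool.and_eq_true_iff.mpr ⟨?_, (PySem.Chars.startswith_iff _ _).mpr hj2⟩
    have hhead : PySem.Str.pyGet? k 0 = some c := by
      simp [hk, PySem.List.pyGet?, PySem.List.pyIdx?]
    rw [hhead, PySem.List.pyGet?_natCast, hLj]
    simp

theorem contains_bugSweep_eq_isIn (L : List Char) (k : String)
    (hne : k.toList ≠ []) (hmem : k ∈ bugKeywords) :
    PySem.Set.contains (bugSweep L) k = PySem.Chars.isIn k.toList L := by
  rcases hb : PySem.Chars.isIn k.toList L with _ | _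
  · rcases hc : PySem.Set.contains (bugSweep L) k with _ | _
    · rfl
    · have := (mem_bugSweep_iff L k hne hmem).mp ((PySem.Set.contains_iff _ _).mp hc)
      rw [this] at hb; exact Bool.noConfusion hb
  · exact (PySem.Set.contains_iff _ _).mpr
      ((mem_bugSweep_iff L k hne hmem).mpr hb)

theorem bug_append_ite (c : Prop) [Decidable c] (s x : List String) :
    (if c then s ++ x else s) = s ++ (if c then x else []) := by
  split_ifs <;> simp

-- ===== VERDICT (by name: the statement is the Claim_ definition above) =====
theorem bug_skills_py_spec : Claim_equal_bug_skills_py := by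
  intro bug_classes module_name _
  unfold Spec_bug_skills_py bug_skills_py bug_skills_py_alt bugSkillGroups
  simp only [List.flatMap_cons, List.flatMap_nil, List.any_cons, List.any_nil,
    contains_bugSweep_eq_isIn _ "authorization" (by decide) (by decide),
    contains_bugSweep_eq_isIn _ "idor" (by decide) (by decide),
    contains_bugSweep_eq_isIn _ "tenant" (by decide) (by decide),
    contains_bugSweep_eq_isIn _ "bola" (by decide) (by decide),
    contains_bugSweep_eq_isIn _ "authentication" (by decide) (by decide),
    contains_bugSweep_eq_isIn _ "jwt" (by decide) (by decide),
    contains_bugSweep_eq_isIn _ "session" (by decide) (by decide),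
    contains_bugSweep_eq_isIn _ "login" (by decide) (by decide),
    contains_bugSweep_eq_isIn _ "mfa" (by decide) (by decide),
    contains_bugSweep_eq_isIn _ "business" (by decide) (by decide),
    contains_bugSweep_eq_isIn _ "workflow" (by decide) (by decide),
    contains_bugSweep_eq_isIn _ "replay" (by decide) (by decide),
    contains_bugSweep_eq_isIn _ "race" (by decide) (by decide),
    contains_bugSweep_eq_isIn _ "sql" (by decide) (by decide),
    contains_bugSweep_eq_isIn _ "xss" (by decide) (by decide),
    contains_bugSweep_eq_isIn _ "html injection" (by decide) (by decide),
    contains_bugSweep_eq_isIn _ "ssrf" (by decide) (by decide),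
    contains_bugSweep_eq_isIn _ "graphql" (by decide) (by decide),
    contains_bugSweep_eq_isIn _ "open redirect" (by decide) (by decide),
    contains_bugSweep_eq_isIn _ "path traversal" (by decide) (by decide),
    contains_bugSweep_eq_isIn _ "file access" (by decide) (by decide),
    contains_bugSweep_eq_isIn _ "file upload" (by decide) (by decide),
    contains_bugSweep_eq_isIn _ "xxe" (by decide) (by decide),
    contains_bugSweep_eq_isIn _ "rce" (by decide) (by decide),
    contains_bugSweep_eq_isIn _ "command injection" (by decide) (by decide),
    PySem.Str.isIn_eq, Bool.or_false, bug_append_ite]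
  simp only [List.nil_append, List.append_nil, List.append_assoc]
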